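-- pv_equiv track=rewrite | github.com/EchoedRadani/static-site-generator | src/block_type_functions.py | is_ordered_list
-- ===== SOURCE A (Python) =====
-- def is_ordered_list(line):
--     check_lines = line.split("\n")
--     if len(check_lines) != 1:
--         return False
--     line = check_lines[0]
--     count = 0
--     for char in line:
--         if char.isdigit():
--             count += 1
--         else:
--             break
--     if len(line) <= count:
--         return False
--     if count == 0 or line[count] != ".":
--         return False
--     if not len(line) > count + 2:
--         return False
--     line_space = line[count + 1]
--     text = line[count + 2:]
--     if line_space != " ":
--         return False
--     return len(text.strip()) != 0
-- ===== SOURCE B (Python) =====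
-- def is_ordered_list(line):
--     if "\n" in line:
--         return False
--     num, dot, rest = line.partition(".")
--     if dot != "." or not num.isdigit():
--         return False
--     if not rest.startswith(" "):
--         return False
--     return rest[1:].strip() != ""
-- ===== Notes on version B (the rewrite author's own statement) =====
-- stated objective: simpler
-- what changed: Replaces A's split-into-lines list, leading-digit counting loop and index arithmetic (line[count], line[count+1], line[count+2:]) by a substring test, one str.partition at the first dot and whole-string predicate checks (isdigit, startswith, strip), maintaining no counter.
import Mathlib
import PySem

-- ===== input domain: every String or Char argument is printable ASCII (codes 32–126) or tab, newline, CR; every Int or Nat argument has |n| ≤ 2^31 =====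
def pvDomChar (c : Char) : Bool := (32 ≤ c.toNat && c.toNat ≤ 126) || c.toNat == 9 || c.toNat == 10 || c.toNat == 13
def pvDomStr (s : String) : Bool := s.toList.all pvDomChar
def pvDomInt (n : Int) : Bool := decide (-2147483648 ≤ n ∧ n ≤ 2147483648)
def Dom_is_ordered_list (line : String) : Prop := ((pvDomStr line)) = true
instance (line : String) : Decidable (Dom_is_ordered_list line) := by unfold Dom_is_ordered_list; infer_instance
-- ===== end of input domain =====

-- B replaces A's counting loop and index arithmetic by partition(".") plus whole-string predicates (objective: simpler).

-- ===== PORT A =====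
-- A's leading-digit counting loop (for char in line: if digit count += 1 else break)
def pvCountDigits : List Char → Nat
  | [] => 0
  | c :: rest => if PySem.Chars.isdigit c then pvCountDigits rest + 1 else 0

def is_ordered_list (line : String) : Bool :=
  let check_lines := PySem.Chars.splitOn line.toList ['\n']
  if check_lines.length ≠ 1 then false
  else
    let cs := PySem.List.pyGetD check_lines 0 []   -- check_lines[0]
    let count := pvCountDigits cs
    if cs.length ≤ count then false
    else if count = 0 ∨ PySem.List.pyGetD cs (count : Int) ' ' ≠ '.' then false
    else if ¬ (cs.length > count + 2) then false
    else
      let line_space := PySem.List.pyGetD cs ((count : Int) + 1) ' '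
      let text := PySem.List.slice cs (some ((count : Int) + 2)) none
      if line_space ≠ ' ' then false
      else decide ((PySem.Chars.strip text).length ≠ 0)

-- ===== PORT B =====
-- str.partition(".") hand-ported for the single-character separator: exact — splits at the FIRST '.',
-- flag true iff '.' occurs (Python's middle component is "." exactly then).
def pvPartitionDot : List Char → List Char × Bool × List Char
  | [] => ([], false, [])
  | c :: rest =>
    if c = '.' then ([], true, rest)
    else
      let p := pvPartitionDot rest
      (c :: p.1, p.2.1, p.2.2)

def is_ordered_list_alt (line : String) : Bool :=
  if line.toList.contains '\n' then false   -- '"\n" in line': exact, the needle is a single character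
  else
    let p := pvPartitionDot line.toList
    if p.2.1 = false ∨ PySem.Chars.strIsdigit p.1 = false then false
    else if PySem.Chars.startswith p.2.2 [' '] = false then false
    else decide ((PySem.Chars.strip (PySem.List.slice p.2.2 (some 1) none)).length ≠ 0)

-- ===== PRECONDITION & SPEC =====
def Spec_is_ordered_list (line : String) (out : Bool) : Prop := out = is_ordered_list_alt line
instance (line : String) (out : Bool) : Decidable (Spec_is_ordered_list line out) := by unfold Spec_is_ordered_list; infer_instance

-- ===== CLAIM (what is proved, stated in full; the proofs are below) =====
def Claim_equal_is_ordered_list : Prop := ∀ (line : String), Dom_is_ordered_list line → Spec_is_ordered_list line (is_ordered_list line)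

-- ===== LEMMAS AND PROOFS =====

theorem pvCountDigits_eq_takeWhile (cs : List Char) :
    pvCountDigits cs = (cs.takeWhile PySem.Chars.isdigit).length := by
  induction cs with
  | nil => rfl
  | cons c rest ih =>
    simp only [pvCountDigits, List.takeWhile]
    by_cases h : PySem.Chars.isdigit c <;> simp [h, ih]

theorem pvPartitionDot_no_dot (cs : List Char) (h : '.' ∉ cs) :
    pvPartitionDot cs = (cs, false, []) := by
  induction cs with
  | nil => rfl
  | cons c rest ih =>
    simp at h
    simp [pvPartitionDot, (show ¬ c = '.' from fun hh => h.1 hh.symm), ih h.2]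

theorem pvPartitionDot_append_digits (ds t : List Char) (h : '.' ∉ ds) :
    pvPartitionDot (ds ++ t) =
      ((ds ++ (pvPartitionDot t).1, (pvPartitionDot t).2.1, (pvPartitionDot t).2.2)) := by
  induction ds with
  | nil => rfl
  | cons d ds ih =>
    simp at h
    simp [pvPartitionDot, (show ¬ d = '.' from fun hh => h.1 hh.symm), ih h.2]

theorem pvGetDAppend {α : Type} [Inhabited α] (pre l : List α) (n : Nat) (d : α) :
    (pre ++ l).getD (pre.length + n) d = l.getD n d := by
  induction pre with
  | nil => simp
  | cons x pre ih => simpa [Nat.succ_add] using ih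

theorem pvDropAppend {α : Type} (pre l : List α) (n : Nat) :
    (pre ++ l).drop (pre.length + n) = l.drop n := by
  induction pre with
  | nil => simp
  | cons x pre ih => simpa [Nat.succ_add] using ih

theorem splitOn_go_no_nl (fuel : Nat) (l cur : List Char) (acc : List (List Char))
    (h : '\n' ∉ l) :
    PySem.Chars.splitOn.go ['\n'] fuel l cur acc = ((cur.reverse ++ l) :: acc).reverse := by
  induction fuel generalizing l cur acc with
  | zero => simp [PySem.Chars.splitOn.go]
  | succ fuel ih =>
    cases l with
    | nil => simp [PySem.Chars.splitOn.go]
    | cons c rest =>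
      simp at h
      have hpre : (['\n'] : List Char).isPrefixOf (c :: rest) = false := by
        simp [List.isPrefixOf]
        intro hc; exact h.1 hc
      rw [PySem.Chars.splitOn.go]
      simp [hpre, ih rest (c :: cur) acc h.2]

theorem splitOn_go_nl (fuel : Nat) : ∀ (l cur : List Char) (acc : List (List Char)),
    '\n' ∈ l → l.length < fuel →
    2 + acc.length ≤ (PySem.Chars.splitOn.go ['\n'] fuel l cur acc).length := by
  induction fuel with
  | zero => intro l cur acc _ hf; omega
  | succ fuel ih =>
    intro l cur acc hm hf
    cases l with
    | nil => simp at hm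
    | cons c rest =>
      by_cases hc : c = '\n'
      · have hpre : (['\n'] : List Char).isPrefixOf (c :: rest) = true := by
          simp [List.isPrefixOf, hc]
        rw [PySem.Chars.splitOn.go]
        simp only [hpre, if_true]
        by_cases hr : '\n' ∈ rest
        · have := ih (List.drop 1 (c :: rest)) [] (cur.reverse :: acc) (by simpa using hr)
            (by simp at hf ⊢; omega)
          simp at this ⊢; omega
        · rw [splitOn_go_no_nl _ _ _ _ (by simpa using hr)]
          simp; omega
      · have hpre : (['\n'] : List Char).isPrefixOf (c :: rest) = false := by
          simp [List.isPrefixOf]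
          intro h; exact hc h.symm
        rw [PySem.Chars.splitOn.go]
        simp only [hpre]
        exact ih rest (c :: cur) acc (by simp at hm; tauto) (by simp at hf ⊢; omega)

theorem splitOn_nl_single (cs : List Char) (h : '\n' ∉ cs) :
    PySem.Chars.splitOn cs ['\n'] = [cs] := by
  unfold PySem.Chars.splitOn
  rw [splitOn_go_no_nl _ _ _ _ h]
  simp

-- the digit run of cs contains no '.'
theorem takeWhile_digits_no_dot (cs : List Char) : '.' ∉ cs.takeWhile PySem.Chars.isdigit := by
  intro hm
  have := List.mem_takeWhile_imp hm
  simp [PySem.Chars.isdigit] at this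

-- the post-newline bodies of the two ports agree on every list of characters
theorem pvCore (cs : List Char) :
    (if cs.length ≤ pvCountDigits cs then false
     else if pvCountDigits cs = 0 ∨ PySem.List.pyGetD cs ((pvCountDigits cs : Nat) : Int) ' ' ≠ '.' then false
     else if ¬ (cs.length > pvCountDigits cs + 2) then false
     else if PySem.List.pyGetD cs (((pvCountDigits cs : Nat) : Int) + 1) ' ' ≠ ' ' then false
     else decide ((PySem.Chars.strip (PySem.List.slice cs (some (((pvCountDigits cs : Nat) : Int) + 2)) none)).length ≠ 0))
    =
    (if (pvPartitionDot cs).2.1 = false ∨ PySem.Chars.strIsdigit (pvPartitionDot cs).1 = false then false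
     else if PySem.Chars.startswith (pvPartitionDot cs).2.2 [' '] = false then false
     else decide ((PySem.Chars.strip (PySem.List.slice (pvPartitionDot cs).2.2 (some 1) none)).length ≠ 0)) := by
  set ds := cs.takeWhile PySem.Chars.isdigit with hds
  set t := cs.dropWhile PySem.Chars.isdigit with ht
  have hsplit : ds ++ t = cs := List.takeWhile_append_dropWhile
  have hcount0 : pvCountDigits cs = ds.length := pvCountDigits_eq_takeWhile cs
  have hdsdig : ∀ c ∈ ds, PySem.Chars.isdigit c := fun c hm => List.mem_takeWhile_imp hm
  have hdsdot : '.' ∉ ds := takeWhile_digits_no_dot cs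
  have hidem : t.dropWhile PySem.Chars.isdigit = t := by
    rw [ht]; exact List.dropWhile_idempotent ..
  clear_value ds t
  cases htc : t with
  | nil =>
    have hlen : cs.length = ds.length := by rw [← hsplit, htc]; simp
    have hnd : '.' ∉ cs := by rw [← hsplit, htc]; simpa using hdsdot
    rw [pvPartitionDot_no_dot cs hnd]
    simp [hcount0, hlen]
  | cons c t' =>
    have hndig : ¬ PySem.Chars.isdigit c := by
      rw [htc] at hidem
      by_contra hd
      rw [List.dropWhile_cons_of_pos hd] at hidem
      have hlen := congrArg List.length hidem
      have hle := List.length_dropWhile_le PySem.Chars.isdigit t'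
      simp at hlen
      omega
    subst htc
    rw [← hsplit] at hcount0 ⊢
    rw [hcount0]
    by_cases hcdot : c = '.'
    · subst hcdot
      have hpd : pvPartitionDot ('.' :: t') = ([], true, t') := by simp [pvPartitionDot]
      rw [pvPartitionDot_append_digits ds ('.' :: t') hdsdot, hpd]
      by_cases hds0 : ds = []
      · subst hds0
        simp [PySem.Chars.strIsdigit]
      · have hdig : PySem.Chars.strIsdigit ds = true := by
          simp [PySem.Chars.strIsdigit, hds0]; exact hdsdig
        have hds0' : ds.length ≠ 0 := by simpa using hds0
        have hdot : PySem.List.pyGetD (ds ++ '.' :: t') ((ds.length : Nat) : Int) ' ' = '.' := by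
          rw [PySem.List.pyGetD_natCast]
          simpa using pvGetDAppend ds ('.' :: t') 0 ' '
        cases t' with
        | nil =>
          have hc3 : ¬ ((ds ++ ['.']).length > ds.length + 2) := by
            simp only [List.length_append, List.length_cons, List.length_nil]; omega
          simp [hdig, hdot, hds0', hc3, PySem.Chars.startswith]
        | cons x t'' =>
          cases t'' with
          | nil =>
            have hc3 : ¬ ((ds ++ ['.', x]).length > ds.length + 2) := by
              simp only [List.length_append, List.length_cons, List.length_nil]; omega
            by_cases hx : x = ' '
            · subst hx
              simp [hdig, hdot, hds0', hc3, PySem.Chars.startswith, PySem.List.slice_from_one,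
                PySem.Chars.strip, PySem.Chars.lstrip, PySem.Chars.rstrip]
            · simp [hdig, hdot, hds0', hc3, PySem.Chars.startswith, List.isPrefixOf, hx,
                (show ¬ ' ' = x from fun h => hx h.symm)]
          | cons y u =>
            have hc3 : (ds ++ '.' :: x :: y :: u).length > ds.length + 2 := by
              simp only [List.length_append, List.length_cons]; omega
            have hspace : PySem.List.pyGetD (ds ++ '.' :: x :: y :: u) (((ds.length : Nat) : Int) + 1) ' ' = x := by
              have hcast : ((ds.length : Int) + 1) = ((ds.length + 1 : Nat) : Int) := by push_cast; ring
              rw [hcast, PySem.List.pyGetD_natCast]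
              simpa using pvGetDAppend ds ('.' :: x :: y :: u) 1 ' '
            have htext : PySem.List.slice (ds ++ '.' :: x :: y :: u) (some (((ds.length : Nat) : Int) + 2)) none = y :: u := by
              have hcast : ((ds.length : Int) + 2) = ((ds.length + 2 : Nat) : Int) := by push_cast; ring
              rw [hcast, PySem.List.slice_from_natCast]
              simpa using pvDropAppend ds ('.' :: x :: y :: u) 2
            by_cases hx : x = ' '
            · subst hx
              simp [hdig, hdot, hds0', hc3, hspace, htext, PySem.Chars.startswith, List.isPrefixOf,
                PySem.List.slice_from_one]
            · simp [hdig, hdot, hds0', hc3, hspace, htext, PySem.Chars.startswith, List.isPrefixOf, hx,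
                (show ¬ ' ' = x from fun h => hx h.symm)]
    · have hA : PySem.List.pyGetD (ds ++ c :: t') ((ds.length : Nat) : Int) ' ' = c := by
        rw [PySem.List.pyGetD_natCast]
        simpa using pvGetDAppend ds (c :: t') 0 ' '
      have hAfalse : (ds.length = 0 ∨
          PySem.List.pyGetD (ds ++ c :: t') ((ds.length : Nat) : Int) ' ' ≠ '.') := by
        right; rw [hA]; exact hcdot
      rw [pvPartitionDot_append_digits ds (c :: t') hdsdot]
      simp only [pvPartitionDot, if_neg hcdot]
      have hBnum : PySem.Chars.strIsdigit (ds ++ c :: (pvPartitionDot t').1) = false := by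
        have hcall : (c :: (pvPartitionDot t').1).all PySem.Chars.isdigit = false := by
          simp [hndig]
        have hall : (ds ++ c :: (pvPartitionDot t').1).all PySem.Chars.isdigit = false := by
          simp [List.all_append, hcall]
        simp [PySem.Chars.strIsdigit, hall]
      have hlen2 : ¬ ((ds ++ c :: t').length ≤ ds.length) := by simp
      rw [if_neg hlen2, if_pos hAfalse, if_pos (Or.inr hBnum)]

theorem is_ordered_list_eq_alt (line : String) :
    is_ordered_list line = is_ordered_list_alt line := by
  unfold is_ordered_list is_ordered_list_alt
  by_cases hnl : '\n' ∈ line.toList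
  · have h1 : (PySem.Chars.splitOn line.toList ['\n']).length ≠ 1 := by
      have := splitOn_go_nl (line.toList.length + 1) line.toList [] [] hnl (by omega)
      unfold PySem.Chars.splitOn
      simp at this ⊢
      omega
    have hct : line.toList.contains '\n' = true := by
      simpa [List.contains_iff_mem] using hnl
    rw [if_pos h1, if_pos hct]
  · have hct : line.toList.contains '\n' = false := by
      simp [List.contains_iff_mem]; exact hnl
    rw [splitOn_nl_single _ hnl]
    have h1 : ¬ (([line.toList] : List (List Char)).length ≠ 1) := by simp
    rw [if_neg h1, if_neg (by rw [hct]; simp : ¬ line.toList.contains '\n' = true)]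
    rw [PySem.List.pyGetD_zero_cons]
    exact pvCore line.toList

-- ===== VERDICT (by name: the statement is the Claim_ definition above) =====
theorem is_ordered_list_spec : Claim_equal_is_ordered_list := by
  intro line _
  unfold Spec_is_ordered_list
  exact is_ordered_list_eq_alt line
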